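-- pv_equiv track=rewrite | github.com/martinzosr/PiRepro | server/server.py | getFoldersLinks
-- ===== SOURCE A (Python) =====
-- def getFoldersLinks(folder = ''):
-- 	if folder == '':
-- 		return ''
-- 	result = "<ol class='breadcrumb'>"
-- 	result += '<li><a href="index.html">home</a></li>'
-- 	lastPath = ''
-- 	for f in folder.split('/'):
-- 		result += '<li><a href="index.html?file=' + lastPath + f + '/">' + f + '</a></li>'
-- 		lastPath += f + '/'
-- 	return result + "</ol>"
-- ===== SOURCE B (Python) =====
-- def getFoldersLinks(folder = ''):
-- 	if folder == '':
-- 		return ''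
-- 	parts = folder.split('/')
-- 	items = [
-- 		'<li><a href="index.html?file=' + '/'.join(parts[:i + 1]) + '/">' + f + '</a></li>'
-- 		for i, f in enumerate(parts)
-- 	]
-- 	return ("<ol class='breadcrumb'>"
-- 		+ '<li><a href="index.html">home</a></li>'
-- 		+ ''.join(items)
-- 		+ '</ol>')
-- ===== Notes on version B (the rewrite author's own statement) =====
-- stated objective: alternative
-- what changed: Replaces the stateful loop threading lastPath across iterations by a stateless list comprehension in which each breadcrumb's href prefix is computed independently by slash-joining the first i+1 path parts, assembled at the end with a single join.
import Mathlib
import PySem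

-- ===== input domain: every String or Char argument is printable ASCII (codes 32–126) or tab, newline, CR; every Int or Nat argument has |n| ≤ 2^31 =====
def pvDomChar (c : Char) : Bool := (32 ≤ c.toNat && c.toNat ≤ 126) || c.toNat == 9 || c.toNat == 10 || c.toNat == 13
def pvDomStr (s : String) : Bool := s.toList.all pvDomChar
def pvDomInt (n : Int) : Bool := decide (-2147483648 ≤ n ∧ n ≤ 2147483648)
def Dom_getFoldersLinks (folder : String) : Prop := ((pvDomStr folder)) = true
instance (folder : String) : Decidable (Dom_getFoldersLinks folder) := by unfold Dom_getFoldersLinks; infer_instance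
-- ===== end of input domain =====

-- B replaces A's stateful loop (threading lastPath across iterations) by a stateless
-- comprehension computing each item's href prefix independently by slash-joining the first i+1 parts; alternative decomposition, same cost.


-- ===== PORT A =====
-- one loop step on the state (result, lastPath): append the <li> for f, extend lastPath
def pvStepA (st : String × String) (f : String) : String × String :=
  (st.1 ++ ("<li><a href=\"index.html?file=" ++ st.2 ++ f ++ "/\">" ++ f ++ "</a></li>"),
   st.2 ++ (f ++ "/"))

def getFoldersLinks (folder : String) : String :=
  if folder = "" then ""
  else
    let result := "<ol class='breadcrumb'>" ++ "<li><a href=\"index.html\">home</a></li>"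
    let st := ((PySem.Str.split? folder "/").getD []).foldl pvStepA (result, "")
    st.1 ++ "</ol>"

-- ===== PORT B =====
-- one comprehension item: href prefix computed independently as '/'.join(parts[:i+1])
def pvItemB (parts : List String) (p : Int × String) : String :=
  "<li><a href=\"index.html?file=" ++ PySem.Str.join "/" (PySem.List.slice parts none (some (p.1 + 1)))
    ++ "/\">" ++ p.2 ++ "</a></li>"

def getFoldersLinks_alt (folder : String) : String :=
  if folder = "" then ""
  else
    let parts := (PySem.Str.split? folder "/").getD []
    let items := (PySem.List.enumerate parts).map (pvItemB parts)
    "<ol class='breadcrumb'>" ++ "<li><a href=\"index.html\">home</a></li>"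
      ++ PySem.Str.join "" items ++ "</ol>"

-- ===== PRECONDITION & SPEC =====
def Spec_getFoldersLinks (folder : String) (out : String) : Prop := out = getFoldersLinks_alt folder
instance (folder : String) (out : String) : Decidable (Spec_getFoldersLinks folder out) := by unfold Spec_getFoldersLinks; infer_instance

-- ===== CLAIM (what is proved, stated in full; the proofs are below) =====
def Claim_equal_getFoldersLinks : Prop := ∀ (folder : String), Dom_getFoldersLinks folder → Spec_getFoldersLinks folder (getFoldersLinks folder)

-- ===== LEMMAS AND PROOFS =====

-- A's lastPath after consuming the parts in pre: each part followed by '/'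
def pvSlashCat : List String → String
  | [] => ""
  | p :: pr => p ++ ("/" ++ pvSlashCat pr)

theorem pvJoinE_nil : PySem.Str.join "" [] = "" := by
  apply String.toList_inj.mp
  simp [PySem.Str.toList_join, PySem.Chars.join_nil]

theorem pvJoinE_cons (x : String) (xs : List String) :
    PySem.Str.join "" (x :: xs) = x ++ PySem.Str.join "" xs := by
  cases xs with
  | nil =>
    apply String.toList_inj.mp
    simp [PySem.Str.toList_join, PySem.Chars.join_singleton, PySem.Chars.join_nil]
  | cons y ys =>
    apply String.toList_inj.mp
    simp [PySem.Str.toList_join, PySem.Chars.join_cons_cons]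

theorem pvSlashCat_append_singleton (pre : List String) (f : String) :
    pvSlashCat (pre ++ [f]) = pvSlashCat pre ++ (f ++ "/") := by
  induction pre with
  | nil => simp [pvSlashCat]
  | cons p pr ih => simp [pvSlashCat, ih, String.append_assoc]

theorem pvJoin_slash_append_singleton (pre : List String) (f : String) :
    PySem.Str.join "/" (pre ++ [f]) = pvSlashCat pre ++ f := by
  induction pre with
  | nil =>
    apply String.toList_inj.mp
    simp [PySem.Str.toList_join, PySem.Chars.join_singleton, pvSlashCat]
  | cons p pr ih =>
    have h1 : PySem.Str.join "/" (p :: (pr ++ [f])) = p ++ "/" ++ PySem.Str.join "/" (pr ++ [f]) := by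
      cases pr with
      | nil =>
        apply String.toList_inj.mp
        simp [PySem.Str.toList_join, PySem.Chars.join_singleton, PySem.Chars.join_cons_cons]
      | cons q qr =>
        apply String.toList_inj.mp
        simp [PySem.Str.toList_join, PySem.Chars.join_cons_cons]
    simp only [List.cons_append, h1, ih, pvSlashCat, String.append_assoc]

-- loop invariant: folding A's step over ps with lastPath = pvSlashCat pre yields res
-- followed by B's items for ps at indices starting at pre.length inside pre ++ ps
theorem pvLoopA_eq (ps pre : List String) (res : String) :
    (ps.foldl pvStepA (res, pvSlashCat pre)).1
      = res ++ PySem.Str.join "" ((PySem.List.enumerate ps (pre.length : Int)).map (pvItemB (pre ++ ps))) := by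
  induction ps generalizing pre res with
  | nil => simp [PySem.List.enumerate, pvJoinE_nil]
  | cons f ps' ih =>
    have hlast : pvSlashCat pre ++ (f ++ "/") = pvSlashCat (pre ++ [f]) :=
      (pvSlashCat_append_singleton pre f).symm
    have hitem : pvStepA (res, pvSlashCat pre) f
        = (res ++ pvItemB (pre ++ f :: ps') ((pre.length : Int), f), pvSlashCat (pre ++ [f])) := by
      have htake : PySem.List.slice (pre ++ f :: ps') none (some ((pre.length : Int) + 1))
          = pre ++ [f] := by
        have : ((pre.length : Int) + 1) = ((pre.length + 1 : Nat) : Int) := by push_cast; ring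
        rw [this, PySem.List.slice_to_natCast]
        have : pre ++ f :: ps' = (pre ++ [f]) ++ ps' := by simp
        rw [this]
        have hlen : pre.length + 1 = (pre ++ [f]).length := by simp
        rw [hlen, List.take_left]
      simp only [pvStepA, pvItemB, htake, pvJoin_slash_append_singleton, hlast,
        String.append_assoc]
    have hcast : (pre.length : Int) + 1 = ((pre ++ [f]).length : Int) := by
      simp
    calc (List.foldl pvStepA (res, pvSlashCat pre) (f :: ps')).1
        = (List.foldl pvStepA
            (res ++ pvItemB (pre ++ f :: ps') ((pre.length : Int), f), pvSlashCat (pre ++ [f])) ps').1 := by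
          rw [List.foldl_cons, hitem]
      _ = res ++ pvItemB (pre ++ f :: ps') ((pre.length : Int), f)
            ++ PySem.Str.join "" ((PySem.List.enumerate ps' ((pre ++ [f]).length : Int)).map (pvItemB ((pre ++ [f]) ++ ps'))) := by
          rw [ih]
      _ = res ++ PySem.Str.join "" ((PySem.List.enumerate (f :: ps') (pre.length : Int)).map (pvItemB (pre ++ f :: ps'))) := by
          rw [PySem.List.enumerate_cons, List.map_cons, pvJoinE_cons, hcast]
          simp [String.append_assoc]

-- ===== VERDICT (by name: the statement is the Claim_ definition above) =====
theorem getFoldersLinks_spec : Claim_equal_getFoldersLinks := by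
  intro folder _
  unfold Spec_getFoldersLinks getFoldersLinks getFoldersLinks_alt
  by_cases h : folder = ""
  · simp [h]
  · simp only [h, if_false]
    have := pvLoopA_eq ((PySem.Str.split? folder "/").getD []) []
      ("<ol class='breadcrumb'>" ++ "<li><a href=\"index.html\">home</a></li>")
    simp only [pvSlashCat, List.length_nil, Nat.cast_zero, List.nil_append] at this
    rw [this]
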